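-- pv_equiv track=rewrite | github.com/maghams62/auto_mac | src/search/modalities/doc_issues.py | _extract_component_token
-- ===== SOURCE A (Python) =====
-- from typing import Any, Dict, List, Optional
--
-- def _extract_component_token(query: str) -> Optional[str]:
--     if not query:
--         return None
--     for token in query.replace(",", " ").split():
--         token = token.strip()
--         if token.startswith("comp:"):
--             return token
--     return None
-- ===== SOURCE B (Python) =====
-- def _extract_component_token(query):
--     cur = []
--     for ch in query + " ":
--         if ch in " \t\n\r\f\v,":
--             if cur:
--                 tok = "".join(cur)
--                 if tok.startswith("comp:"):
--                     return tok
--                 cur = []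
--         else:
--             cur.append(ch)
--     return None
-- ===== Notes on version B (the rewrite author's own statement) =====
-- stated objective: simpler
-- what changed: A builds an intermediate string (comma-to-space replace) and an intermediate token list (split) and then loops over the tokens; B makes a single character-level pass over the query with a pending-token accumulator, checking each completed token at its delimiter, with no intermediate string or token list.
import Mathlib
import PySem

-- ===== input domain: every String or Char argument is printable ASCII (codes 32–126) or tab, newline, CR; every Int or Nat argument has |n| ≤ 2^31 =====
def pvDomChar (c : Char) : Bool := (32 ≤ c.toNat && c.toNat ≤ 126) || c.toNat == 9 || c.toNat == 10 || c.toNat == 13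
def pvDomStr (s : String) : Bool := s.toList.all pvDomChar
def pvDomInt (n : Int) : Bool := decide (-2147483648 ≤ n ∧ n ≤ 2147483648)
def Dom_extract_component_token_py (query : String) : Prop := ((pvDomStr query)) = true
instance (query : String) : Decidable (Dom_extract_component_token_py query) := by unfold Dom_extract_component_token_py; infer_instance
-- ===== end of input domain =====

-- B replaces A's replace-comma/split/loop pipeline by a single character scan with a token
-- accumulator (simpler: one pass, no intermediate token list); same return value on Dom.

-- ===== PORT A =====
-- the 'for token in …: if token.startswith("comp:"): return token' loop
def loopA : List String → Option String
  | [] => none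
  | t :: rest =>
    let t' := PySem.Str.strip t
    if PySem.Str.startswith t' "comp:" then some t' else loopA rest

def extract_component_token_py (query : String) : Option String :=
  if query = "" then none
  else loopA (PySem.Str.split₀ (PySem.Str.replace query "," " "))

-- ===== PORT B =====
-- Source B's delimiter test: ch in " \t\n\r\f\v,"
def pvIsDelim (c : Char) : Bool :=
  c == ' ' || c == '\t' || c == '\n' || c == '\r' || c == '\x0c' || c == '\x0b' || c == ','

-- Source B's loop: cur is the pending token's characters, flushed at each delimiter
def scanB : List Char → List Char → Option String
  | [], _ => none
  | c :: rest, cur =>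
    if pvIsDelim c then
      if cur.isEmpty then scanB rest []
      else if PySem.Str.startswith (String.ofList cur) "comp:" then some (String.ofList cur)
      else scanB rest []
    else scanB rest (cur ++ [c])

def extract_component_token_py_alt (query : String) : Option String :=
  scanB (query.toList ++ [' ']) []

-- ===== PRECONDITION & SPEC =====
def Spec_extract_component_token_py (query : String) (out : Option String) : Prop := out = extract_component_token_py_alt query
instance (query : String) (out : Option String) : Decidable (Spec_extract_component_token_py query out) := by unfold Spec_extract_component_token_py; infer_instance

-- ===== CLAIM (what is proved, stated in full; the proofs are below) =====
def Claim_equal_extract_component_token_py : Prop := ∀ (query : String), Dom_extract_component_token_py query → Spec_extract_component_token_py query (extract_component_token_py query)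

-- ===== LEMMAS AND PROOFS =====

-- comma-to-space map performed by A's query.replace(",", " ")
def pvF (c : Char) : Char := if c = ',' then ' ' else c

-- A's token loop, over lists of characters
def loopA' : List (List Char) → Option (List Char)
  | [] => none
  | t :: rest =>
    let t' := PySem.Chars.strip t
    if PySem.Chars.startswith t' "comp:".toList then some t' else loopA' rest

theorem char_beq_iff (c d : Char) : (c == d) = true ↔ c.toNat = d.toNat := by
  constructor
  · intro h; rw [eq_of_beq h]
  · intro h; exact beq_iff_eq.mpr (Char.ext (UInt32.toNat_inj.mp h))

theorem pvF_isspace (c : Char) (hd : pvDomChar c = true) :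
    PySem.Chars.isspace (pvF c) = pvIsDelim c := by
  by_cases hc : c = ','
  · subst hc; decide
  · simp only [pvDomChar, Bool.or_eq_true, Bool.and_eq_true,
      decide_eq_true_eq, beq_iff_eq] at hd
    rw [Bool.eq_iff_iff]
    simp only [pvF, if_neg hc, pvIsDelim, PySem.Chars.isspace, Bool.or_eq_true,
      Bool.and_eq_true, decide_eq_true_eq, char_beq_iff,
      (by decide : (' ').toNat = 32), (by decide : ('\t').toNat = 9),
      (by decide : ('\n').toNat = 10), (by decide : ('\r').toNat = 13),
      (by decide : ('\x0c').toNat = 12), (by decide : ('\x0b').toNat = 11),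
      (by decide : (',').toNat = 44)]
    have hcn : c.toNat ≠ 44 := fun h => hc (Char.ext (UInt32.toNat_inj.mp h))
    omega

theorem pvF_nondelim (c : Char) (h : pvIsDelim c = false) : pvF c = c := by
  simp only [pvIsDelim, Bool.or_eq_false_iff, beq_eq_false_iff_ne, ne_eq] at h
  exact if_neg h.2

theorem nondelim_not_isspace (c : Char) (hd : pvDomChar c = true) (h : pvIsDelim c = false) :
    PySem.Chars.isspace c = false := by
  simp only [pvDomChar, Bool.or_eq_true, Bool.and_eq_true, decide_eq_true_eq, beq_iff_eq] at hd
  simp only [pvIsDelim, Bool.or_eq_false_iff, beq_eq_false_iff_ne, ne_eq] at h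
  obtain ⟨⟨⟨⟨⟨⟨h1,h2⟩,h3⟩,h4⟩,h5⟩,h6⟩,h7⟩ := h
  have n1 : c.toNat ≠ 32 := fun hh => h1 (Char.ext (UInt32.toNat_inj.mp hh))
  have n2 : c.toNat ≠ 9 := fun hh => h2 (Char.ext (UInt32.toNat_inj.mp hh))
  have n3 : c.toNat ≠ 10 := fun hh => h3 (Char.ext (UInt32.toNat_inj.mp hh))
  have n4 : c.toNat ≠ 13 := fun hh => h4 (Char.ext (UInt32.toNat_inj.mp hh))
  have n5 : c.toNat ≠ 12 := fun hh => h5 (Char.ext (UInt32.toNat_inj.mp hh))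
  have n6 : c.toNat ≠ 11 := fun hh => h6 (Char.ext (UInt32.toNat_inj.mp hh))
  rw [Bool.eq_false_iff]
  simp only [PySem.Chars.isspace, ne_eq, Bool.or_eq_true, Bool.and_eq_true, decide_eq_true_eq,
    not_or, not_and, not_le]
  omega

theorem replace_go_comma (fuel : Nat) : ∀ (l acc : List Char), l.length ≤ fuel →
    PySem.Chars.replace.go [','] [' '] fuel l acc = acc.reverse ++ l.map pvF := by
  induction fuel with
  | zero =>
    intro l acc h
    have : l = [] := List.eq_nil_of_length_eq_zero (Nat.le_zero.mp h)
    subst this; simp [PySem.Chars.replace.go]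
  | succ n ih =>
    intro l acc h
    cases l with
    | nil => simp [PySem.Chars.replace.go]
    | cons c t =>
      rw [PySem.Chars.replace.go]
      by_cases hc : c = ','
      · subst hc
        have hp : ([','].isPrefixOf (',' :: t)) = true := by simp [List.isPrefixOf]
        rw [hp]
        rw [show List.drop [','].length (',' :: t) = t from rfl]
        rw [ih _ _ (by simp only [List.length_cons] at h; omega)]
        simp [pvF]
      · have hp : ([','].isPrefixOf (c :: t)) = false := by
          simp [List.isPrefixOf]
          intro hh; exact absurd hh.symm hc
        rw [hp]
        simp only [Bool.false_eq_true, if_false]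
        rw [ih _ _ (by simpa using Nat.le_of_succ_le_succ (by simpa using h))]
        simp [pvF, hc]

theorem replace_comma (l : List Char) :
    PySem.Chars.replace l [','] [' '] = l.map pvF := by
  rw [PySem.Chars.replace]
  simp only [List.isEmpty_cons, if_false, Bool.false_eq_true]
  exact replace_go_comma l.length l [] le_rfl

theorem split_go_acc (l : List Char) : ∀ (cur : List Char) (acc : List (List Char)),
    PySem.Chars.split₀.go l cur acc = acc.reverse ++ PySem.Chars.split₀.go l cur [] := by
  induction l with
  | nil =>
    intro cur acc
    rw [PySem.Chars.split₀.go, PySem.Chars.split₀.go]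
    by_cases hc : cur.isEmpty <;> simp [hc]
  | cons c rest ih =>
    intro cur acc
    rw [PySem.Chars.split₀.go]
    conv_rhs => rw [PySem.Chars.split₀.go]
    by_cases hs : PySem.Chars.isspace c
    · simp only [hs, if_true]
      by_cases hc : cur.isEmpty
      · simp only [hc, if_true]
        exact ih [] acc
      · simp only [hc, Bool.false_eq_true, if_false]
        rw [ih [] (cur.reverse :: acc), ih [] [cur.reverse]]
        simp
    · simp only [hs, Bool.false_eq_true, if_false]
      exact ih (c :: cur) acc

theorem dropWhile_space_id (l : List Char) (h : ∀ c ∈ l, PySem.Chars.isspace c = false) :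
    List.dropWhile PySem.Chars.isspace l = l := by
  cases l with
  | nil => rfl
  | cons c t =>
    rw [List.dropWhile_cons_of_neg]
    simp [h c (by simp)]

theorem strip_id (t : List Char) (h : ∀ c ∈ t, PySem.Chars.isspace c = false) :
    PySem.Chars.strip t = t := by
  rw [PySem.Chars.strip, PySem.Chars.lstrip, PySem.Chars.rstrip]
  rw [dropWhile_space_id t h]
  rw [dropWhile_space_id t.reverse (fun c hc => h c (List.mem_reverse.mp hc))]
  exact List.reverse_reverse t

theorem compL : "comp:".toList = ['c','o','m','p',':'] := rfl

theorem strip_str (t : String) : PySem.Str.strip t = String.ofList (PySem.Chars.strip t.toList) := by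
  apply String.toList_inj.mp
  simp [PySem.Str.toList_strip]

theorem loopA_eq (ts : List String) :
    loopA ts = Option.map String.ofList (loopA' (ts.map String.toList)) := by
  induction ts with
  | nil => rfl
  | cons t rest ih =>
    rw [loopA]
    simp only [List.map_cons]
    rw [loopA']
    rw [PySem.Str.startswith_eq, PySem.Str.toList_strip]
    simp only [compL]
    by_cases hs : PySem.Chars.startswith (PySem.Chars.strip t.toList) ['c','o','m','p',':'] = true
    · rw [if_pos hs, if_pos hs, strip_str]
      rfl
    · rw [if_neg hs, if_neg hs]
      exact ih

theorem main_scan (cs : List Char) : ∀ (cur : List Char),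
    (∀ c ∈ cs, pvDomChar c = true) →
    (∀ c ∈ cur, PySem.Chars.isspace c = false) →
    scanB (cs ++ [' ']) cur =
      Option.map String.ofList (loopA' (PySem.Chars.split₀.go (cs.map pvF) cur.reverse [])) := by
  induction cs with
  | nil =>
    intro cur hcs hcur
    simp only [List.nil_append, List.map_nil]
    rw [scanB, PySem.Chars.split₀.go]
    by_cases hc : cur.isEmpty
    · have : cur = [] := by simpa [List.isEmpty_iff] using hc
      subst this
      simp [scanB, loopA', pvIsDelim]
    · have hne : cur ≠ [] := by simpa [List.isEmpty_iff] using hc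
      have hrc : cur.reverse.isEmpty = false := by simp [List.isEmpty_iff, hne]
      rw [if_pos (by decide), if_neg (by simp [hc]), hrc]
      simp only [Bool.false_eq_true, if_false, List.reverse_reverse, List.reverse_cons,
        List.reverse_nil, List.nil_append]
      rw [loopA']
      rw [strip_id cur hcur]
      rw [PySem.Str.startswith_eq]
      simp only [String.toList_ofList, compL]
      by_cases hs : PySem.Chars.startswith cur ['c','o','m','p',':'] = true
      · rw [if_pos hs, if_pos hs]
        rfl
      · rw [if_neg hs, if_neg hs]
        rfl
  | cons c rest ih =>
    intro cur hcs hcur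
    have hdc : pvDomChar c = true := hcs c (by simp)
    have hrest : ∀ x ∈ rest, pvDomChar x = true := fun x hx => hcs x (by simp [hx])
    simp only [List.cons_append, List.map_cons]
    rw [scanB, PySem.Chars.split₀.go, pvF_isspace c hdc]
    by_cases hdel : pvIsDelim c
    · simp only [hdel, if_true]
      by_cases hc : cur.isEmpty
      · have : cur = [] := by simpa [List.isEmpty_iff] using hc
        subst this
        simp only [List.isEmpty_nil, List.reverse_nil, if_true]
        exact ih [] hrest (by simp)
      · have hne : cur ≠ [] := by simpa [List.isEmpty_iff] using hc
        have hrc : cur.reverse.isEmpty = false := by simp [List.isEmpty_iff, hne]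
        rw [if_neg (by simp [hc]), hrc]
        simp only [Bool.false_eq_true, if_false, List.reverse_reverse]
        rw [split_go_acc]
        simp only [List.reverse_reverse, List.reverse_cons, List.reverse_nil, List.nil_append,
          List.singleton_append]
        rw [loopA']
        rw [strip_id cur hcur]
        rw [PySem.Str.startswith_eq]
        simp only [String.toList_ofList, compL]
        by_cases hs : PySem.Chars.startswith cur ['c','o','m','p',':'] = true
        · rw [if_pos hs, if_pos hs]
          rfl
        · rw [if_neg hs, if_neg hs]
          exact ih [] hrest (by simp)
    · have hf : pvIsDelim c = false := eq_false_of_ne_true hdel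
      simp only [hf, Bool.false_eq_true, if_false]
      rw [pvF_nondelim c hf]
      have : c :: cur.reverse = (cur ++ [c]).reverse := by simp
      rw [this]
      refine ih (cur ++ [c]) hrest ?_
      intro x hx
      rcases List.mem_append.mp hx with hx1 | hx1
      · exact hcur x hx1
      · have hxc : x = c := by simpa using hx1
        rw [hxc]
        exact nondelim_not_isspace c hdc hf

-- ===== VERDICT (by name: the statement is the Claim_ definition above) =====
theorem extract_component_token_py_spec : Claim_equal_extract_component_token_py := by
  intro query hdom
  show extract_component_token_py query = extract_component_token_py_alt query
  by_cases hq : query = ""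
  · subst hq
    decide
  · rw [extract_component_token_py, if_neg hq, extract_component_token_py_alt, loopA_eq]
    rw [PySem.Str.split₀_map_toList, PySem.Str.toList_replace]
    rw [show (",").toList = [','] from rfl, show (" ").toList = [' '] from rfl]
    rw [replace_comma, PySem.Chars.split₀]
    have hdom' : ∀ c ∈ query.toList, pvDomChar c = true := by
      simpa [Dom_extract_component_token_py, pvDomStr, List.all_eq_true] using hdom
    simpa using (main_scan query.toList [] hdom' (by simp)).symm
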